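-- pv_equiv track=rewrite | github.com/bernardosulzbach/advent-of-code | 2016/04.py | derive_checksum
-- ===== SOURCE A (Python) =====
-- def derive_checksum(name):
--     frequencies = {}
--     for character in name:
--         if character != '-':
--             frequencies.update({character: frequencies.get(character, 0) + 1})
--     values = []
--     for key in frequencies:
--         values.append((frequencies.get(key), key))
--     values = sorted(values, key=lambda v: (v[0], ord('z') - ord(v[1])), reverse=True)
--     return ''.join(value[1] for value in values[:4])
-- ===== SOURCE B (Python) =====
-- def derive_checksum(name):
--     counts = {}
--     for character in name:
--         if character != '-':
--             counts[character] = counts.get(character, 0) + 1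
--     buckets = {}
--     for character, count in counts.items():
--         buckets.setdefault(count, []).append(character)
--     result = []
--     for count in range(max(buckets, default=0), 0, -1):
--         if count in buckets:
--             for character in sorted(buckets[count]):
--                 result.append(character)
--     return ''.join(result[:4])
-- ===== Notes on version B (the rewrite author's own statement) =====
-- stated objective: faster
-- what changed: B replaces A's comparison sort of (count, letter) tuples by a bucket distribution: letters are grouped into a dict keyed by frequency, then emitted from the highest count down, each bucket sorted alphabetically, truncated to four letters.
import Mathlib
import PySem

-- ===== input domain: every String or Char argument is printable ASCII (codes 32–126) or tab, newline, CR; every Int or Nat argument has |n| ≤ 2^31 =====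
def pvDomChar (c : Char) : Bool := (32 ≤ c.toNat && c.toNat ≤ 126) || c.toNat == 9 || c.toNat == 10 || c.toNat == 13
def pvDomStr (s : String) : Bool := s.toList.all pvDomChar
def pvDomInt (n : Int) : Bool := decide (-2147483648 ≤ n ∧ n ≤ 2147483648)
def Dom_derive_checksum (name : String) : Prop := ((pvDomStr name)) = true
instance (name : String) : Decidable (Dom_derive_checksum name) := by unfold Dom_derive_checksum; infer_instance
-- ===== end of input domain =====

-- B replaces A's comparison sort of (count, letter) tuples by a bucket pass: letters are grouped
-- by frequency and emitted from the highest bucket down, each bucket in alphabetical order.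

-- ===== PORT A =====
def derive_checksum (name : String) : String :=
  -- frequencies = {}; for character in name: if character != '-': frequencies[character] += 1
  let frequencies : PySem.Dict Char Int :=
    name.toList.foldl
      (fun d c => if c ≠ '-' then d.insert c (d.getD c 0 + 1) else d) PySem.Dict.empty
  -- values = []; for key in frequencies: values.append((frequencies.get(key), key))
  -- (key is always present, so frequencies.get(key) is its count: ported as getD key 0)
  let values : List (Int × Char) :=
    frequencies.keys.foldl (fun acc k => acc ++ [(frequencies.getD k 0, k)]) []
  -- values = sorted(values, key=lambda v: (v[0], ord('z') - ord(v[1])), reverse=True)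
  let values :=
    PySem.List.sorted2 values (fun v => v.1) (fun v => (122 : Int) - (v.2.toNat : Int)) true
  -- return ''.join(value[1] for value in values[:4])
  String.ofList ((PySem.List.slice values none (some 4)).map (fun v => v.2))

-- ===== PORT B =====
def derive_checksum_alt (name : String) : String :=
  -- counts = {}; for character in name: if character != '-': counts[character] += 1
  let counts : PySem.Dict Char Int :=
    name.toList.foldl
      (fun d c => if c ≠ '-' then d.insert c (d.getD c 0 + 1) else d) PySem.Dict.empty
  -- buckets = {}; for character, count in counts.items(): buckets.setdefault(count, []).append(character)
  let buckets : PySem.Dict Int (List Char) :=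
    counts.items.foldl (fun b p => b.modify p.2 [] (· ++ [p.1])) PySem.Dict.empty
  -- result = []; for count in range(max(buckets, default=0), 0, -1): ...
  let result : List Char :=
    (PySem.List.pyRange (PySem.List.maxD buckets.keys (fun k => k) 0) 0 (-1)).foldl
      (fun acc n =>
        if buckets.contains n then
          acc ++ PySem.List.sorted (buckets.getD n []) (fun c => c) false
        else acc) []
  -- return ''.join(result[:4])
  String.ofList (PySem.List.slice result none (some 4))

-- ===== PRECONDITION & SPEC =====
def Spec_derive_checksum (name : String) (out : String) : Prop := out = derive_checksum_alt name
instance (name : String) (out : String) : Decidable (Spec_derive_checksum name out) := by unfold Spec_derive_checksum; infer_instance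

-- ===== CLAIM (what is proved, stated in full; the proofs are below) =====
def Claim_equal_derive_checksum : Prop := ∀ (name : String), Dom_derive_checksum name → Spec_derive_checksum name (derive_checksum name)

-- ===== LEMMAS AND PROOFS =====

-- a 'for x in l: if p(x): acc = f(acc, x)' loop is the same loop over the filtered list
theorem pvFoldlIfFilter {α β : Type} (p : α → Prop) [DecidablePred p] (f : β → α → β) :
    ∀ (l : List α) (init : β),
      l.foldl (fun a c => if p c then f a c else a) init
        = (l.filter (fun c => decide (p c))).foldl f init := by
  intro l
  induction l with
  | nil => intro init; rfl
  | cons c t ih =>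
    intro init
    by_cases h : p c <;> simp [h, ih]

-- insertBy only looks at comparisons of the inserted element with the list elements
theorem pvInsertByCongr {α : Type} (b1 b2 : α → α → Bool) (x : α) :
    ∀ (ys : List α), (∀ y ∈ ys, b1 x y = b2 x y) →
      PySem.List.insertBy b1 x ys = PySem.List.insertBy b2 x ys := by
  intro ys
  induction ys with
  | nil => intro _; rfl
  | cons y t ih =>
    intro h
    have hxy : b1 x y = b2 x y := h y (by simp)
    simp only [PySem.List.insertBy, hxy]
    by_cases hb : b2 x y = true
    · simp [hb]
    · simp only [hb]
      have := ih (fun z hz => h z (by simp [hz]))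
      simp [this]

-- an insertion-sort fold only compares elements of the input list
theorem pvFoldlInsertByCongr {α : Type} (b1 b2 : α → α → Bool) :
    ∀ (xs acc : List α),
      (∀ a ∈ xs, ∀ b ∈ xs, b1 a b = b2 a b) →
      (∀ a ∈ xs, ∀ b ∈ acc, b1 a b = b2 a b) →
      xs.foldl (fun acc x => PySem.List.insertBy b1 x acc) acc
        = xs.foldl (fun acc x => PySem.List.insertBy b2 x acc) acc := by
  intro xs
  induction xs with
  | nil => intro acc _ _; rfl
  | cons x t ih =>
    intro acc hxs hacc
    have h1 : PySem.List.insertBy b1 x acc = PySem.List.insertBy b2 x acc :=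
      pvInsertByCongr b1 b2 x acc (fun y hy => hacc x (by simp) y hy)
    simp only [List.foldl_cons, h1]
    exact ih _ (fun a ha b hb => hxs a (by simp [ha]) b (by simp [hb]))
      (fun a ha b hb => by
        rcases (PySem.List.mem_insertBy b2 x b acc).mp hb with h | h
        · subst h; exact hxs a (by simp [ha]) b (by simp)
        · exact hacc a (by simp [ha]) b h)

-- pointwise permutation of the blocks gives a permutation of the flattened list
theorem pvFlatMapPermCongr {α β : Type} (g1 g2 : α → List β) :
    ∀ (ns : List α), (∀ n ∈ ns, (g1 n).Perm (g2 n)) →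
      (ns.flatMap g1).Perm (ns.flatMap g2) := by
  intro ns
  induction ns with
  | nil => intro _; simp
  | cons n t ih =>
    intro h
    simp only [List.flatMap_cons]
    exact (h n (by simp)).append (ih (fun m hm => h m (by simp [hm])))

-- distributing a list into buckets by a key and concatenating the buckets is a permutation
theorem pvFlatMapFilterPerm {α β : Type} [BEq β] [LawfulBEq β] (f : α → β) :
    ∀ (ns : List β) (S : List α), ns.Nodup → (∀ x ∈ S, f x ∈ ns) →
      (ns.flatMap (fun n => S.filter (fun c => f c == n))).Perm S := by
  intro ns
  induction ns with
  | nil =>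
    intro S _ h
    have : S = [] := List.eq_nil_iff_forall_not_mem.mpr (fun x hx => by simpa using h x hx)
    simp [this]
  | cons n t ih =>
    intro S hnd h
    have hn : n ∉ t := (List.nodup_cons.mp hnd).1
    have ht : t.Nodup := (List.nodup_cons.mp hnd).2
    simp only [List.flatMap_cons]
    -- the tail buckets of S are the tail buckets of S with the n-bucket removed
    have hrest : t.flatMap (fun m => S.filter (fun c => f c == m))
        = t.flatMap (fun m => (S.filter (fun c => !(f c == n))).filter (fun c => f c == m)) := by
      refine List.flatMap_congr (fun m hm => ?_)
      rw [List.filter_filter]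
      refine (List.filter_congr (fun c _ => ?_)).symm
      by_cases hc : (f c == m) = true
      · have hne : (f c == n) = false := by
          by_contra hx
          have hcn : (f c == n) = true := by revert hx; cases (f c == n) <;> simp
          have hmn : m = n := (eq_of_beq hc).symm.trans (eq_of_beq hcn)
          exact hn (hmn ▸ hm)
        simp [hc, hne]
      · simp [hc]
    rw [hrest]
    have hS' : ∀ x ∈ S.filter (fun c => !(f c == n)), f x ∈ t := by
      intro x hx
      rcases List.mem_filter.mp hx with ⟨hxS, hxn⟩
      rcases List.mem_cons.mp (h x hxS) with h' | h'
      · simp [h'] at hxn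
      · exact h'
    have hpm := ih (S.filter (fun c => !(f c == n))) ht hS'
    exact (List.Perm.append_left _ hpm).trans (List.filter_append_perm _ S)

-- the combined integer key that realises A's lexicographic (count, ord 'z' - ord letter) key
def pvK (v : Int × Char) : Int := v.1 * 1024 + (122 - (v.2.toNat : Int))

theorem derive_checksum_eq (name : String) (hd : Dom_derive_checksum name) :
    derive_checksum name = derive_checksum_alt name := by
  unfold derive_checksum derive_checksum_alt
  dsimp only
  -- shared counting loop
  set cs : List Char := name.toList.filter (fun c => decide (c ≠ '-')) with hcs
  have hcount : name.toList.foldl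
      (fun d c => if c ≠ '-' then d.insert c (d.getD c 0 + 1) else d) PySem.Dict.empty
      = PySem.Dict.counter cs := by
    simp only [pvFoldlIfFilter]
    exact PySem.Dict.foldl_insert_getD_add_one_eq_counter cs
  rw [hcount]
  set S : List Char := PySem.Set.ofList cs with hS
  set f : Char → Int := fun c => (List.count c cs : Int) with hf
  set pairF : Char → Int × Char := fun c => (f c, c) with hpairF
  have hSnodup : S.Nodup := PySem.Set.nodup_ofList cs
  have hmemS : ∀ c ∈ S, c ∈ cs := fun c hc => (PySem.Set.mem_ofList cs c).mp hc
  have hbound : ∀ c ∈ S, c.toNat ≤ 126 := by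
    intro c hc
    have h1 : c ∈ name.toList := List.mem_of_mem_filter (hmemS c hc)
    have h2 : pvDomChar c = true := by
      have := hd
      unfold Dom_derive_checksum pvDomStr at this
      exact List.all_eq_true.mp this c h1
    unfold pvDomChar at h2
    simp only [Bool.or_eq_true, Bool.and_eq_true, decide_eq_true_eq, beq_iff_eq] at h2
    omega
  have hpos : ∀ c ∈ S, 1 ≤ f c := by
    intro c hc
    have : 0 < List.count c cs := List.count_pos_iff.mpr (hmemS c hc)
    simp only [hf]; omega
  -- A's values list
  have hvalues : (PySem.Dict.counter cs).keys.foldl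
      (fun acc k => acc ++ [((PySem.Dict.counter cs).getD k 0, k)]) []
      = S.map pairF := by
    rw [PySem.List.foldl_append_singleton_eq_map]
    simp only [List.nil_append, PySem.Dict.keys_counter, PySem.Dict.getD_counter, ← hS]
    rfl
  rw [hvalues]
  -- B's buckets dict, re-expressed as a fold over the same (count, letter) pairs
  have hbuck : (PySem.Dict.counter cs).items.foldl
      (fun b p => b.modify p.2 [] (· ++ [p.1])) PySem.Dict.empty
      = (S.map pairF).foldl (fun b q => b.modify q.1 [] (· ++ [q.2])) PySem.Dict.empty := by
    rw [PySem.Dict.items_counter, List.foldl_map, List.foldl_map]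
  rw [hbuck]
  set buckets : PySem.Dict Int (List Char) :=
    (S.map pairF).foldl (fun b q => b.modify q.1 [] (· ++ [q.2])) PySem.Dict.empty with hbdef
  have hgetD : ∀ n : Int, buckets.getD n [] = S.filter (fun c => f c == n) := by
    intro n
    rw [hbdef, PySem.Dict.getD_foldl_modify_append (S.map pairF) PySem.Dict.empty n]
    simp [List.filter_map, List.map_map, hpairF, Function.comp_def]
  have hkeys : buckets.keys = PySem.Set.ofList (S.map f) := by
    rw [hbdef, PySem.Dict.keys_foldl_modify_key (S.map pairF) (fun q => q.1) []
      (fun d q => fun cur => cur ++ [q.2]) PySem.Dict.empty]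
    simp [PySem.Set.update_nil_left, List.map_map, hpairF, Function.comp_def]
  set maxn : Int := PySem.List.maxD buckets.keys (fun k => k) 0 with hmaxn
  have hmax : ∀ n ∈ buckets.keys, n ≤ maxn := by
    intro n hn
    rcases hm : PySem.List.max? buckets.keys (fun k => k) with _ | m
    · rw [(PySem.List.max?_eq_none_iff _ _).mp hm] at hn; simp at hn
    · have := PySem.List.max?_isMax hm n hn
      simpa [hmaxn, PySem.List.maxD, hm] using this
  set range : List Int := PySem.List.pyRange maxn 0 (-1) with hrange
  have hmemrange : ∀ c ∈ S, f c ∈ range := by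
    intro c hc
    have h1 : f c ∈ buckets.keys := by
      rw [hkeys]
      exact (PySem.Set.mem_ofList _ _).mpr (List.mem_map.mpr ⟨c, hc, rfl⟩)
    have h2 := hmax _ h1
    have h3 := hpos c hc
    rw [hrange]
    exact PySem.List.mem_pyRange_neg_one.mpr ⟨by omega, h2⟩
  -- rewrite B's output loop into a flatMap over per-count blocks
  have hloop : range.foldl
      (fun acc n =>
        if buckets.contains n then acc ++ PySem.List.sorted (buckets.getD n []) (fun c => c) false
        else acc) []
      = range.flatMap (fun n => PySem.List.sorted (S.filter (fun c => f c == n)) (fun c => c) false) := by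
    have hbody : (fun (acc : List Char) n =>
        if buckets.contains n then acc ++ PySem.List.sorted (buckets.getD n []) (fun c => c) false
        else acc)
        = fun acc n => acc ++ (if buckets.contains n then
            PySem.List.sorted (buckets.getD n []) (fun c => c) false else []) := by
      funext acc n; split <;> simp
    rw [hbody, PySem.List.foldl_append_eq_flatMap, List.nil_append]
    refine List.flatMap_congr (fun n _ => ?_)
    by_cases hc : buckets.contains n = true
    · rw [if_pos hc, hgetD n]
    · rw [if_neg hc]
      have hempty : S.filter (fun c => f c == n) = [] := by
        refine List.filter_eq_nil_iff.mpr (fun c hcS hfc => ?_)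
        have : f c = n := by simpa using hfc
        apply hc
        rw [PySem.Dict.contains_iff_mem_keys, hkeys]
        exact (PySem.Set.mem_ofList _ _).mpr (List.mem_map.mpr ⟨c, hcS, this⟩)
      rw [hempty]
      rfl
  rw [hloop]
  set R : List Char :=
    range.flatMap (fun n => PySem.List.sorted (S.filter (fun c => f c == n)) (fun c => c) false)
    with hR
  -- R is a permutation of the distinct letters S
  have hrangend : range.Nodup := by
    rw [hrange, PySem.List.pyRange_neg_one_eq_reverse]
    exact List.nodup_reverse.mpr (PySem.List.nodup_pyRange_one _ _)
  have hpermR : R.Perm S := by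
    rw [hR]
    refine (pvFlatMapPermCongr _ (fun n => S.filter (fun c => f c == n)) range
      (fun n _ => PySem.List.sorted_perm _ _ _)).trans ?_
    exact pvFlatMapFilterPerm f range S hrangend hmemrange
  -- every letter of the bucket for n lies in S and has count n
  have hblockmem : ∀ n : Int, ∀ c ∈ PySem.List.sorted (S.filter (fun c => f c == n)) (fun c => c) false,
      c ∈ S ∧ f c = n := by
    intro n c hcmem
    have hmem := (PySem.List.mem_sorted _ _ _ _).mp hcmem
    rcases List.mem_filter.mp hmem with ⟨h1, h2⟩
    exact ⟨h1, by simpa using h2⟩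
  -- the combined key pvK strictly decreases along R
  have hpwR : R.Pairwise (fun a b => pvK (pairF b) < pvK (pairF a)) := by
    rw [hR, List.pairwise_flatMap]
    constructor
    · intro n _
      have hnd : (PySem.List.sorted (S.filter (fun c => f c == n)) (fun c => c) false).Nodup :=
        ((PySem.List.sorted_perm _ _ _).nodup_iff).mpr (hSnodup.filter _)
      have hle := PySem.List.sorted_pairwise (S.filter (fun c => f c == n)) (fun c => c)
      have hlt := (hle.and hnd).imp (fun h => lt_of_le_of_ne h.1 h.2)
      refine hlt.imp_of_mem ?_
      intro a b ha hb hab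
      obtain ⟨haS, hfa⟩ := hblockmem n a ha
      obtain ⟨hbS, hfb⟩ := hblockmem n b hb
      have htn : a.toNat < b.toNat := by simpa [Char.lt_def] using hab
      simp only [pvK, hpairF, hfa, hfb]
      omega
    · have hgt : range.Pairwise (fun a b => b < a) := by
        rw [hrange, PySem.List.pyRange_neg_one_eq_reverse]
        exact List.pairwise_reverse.mpr (PySem.List.pairwise_lt_pyRange_one _ _)
      refine hgt.imp ?_
      intro n₁ n₂ h12 x hx y hy
      obtain ⟨hxS, hfx⟩ := hblockmem n₁ x hx
      obtain ⟨hyS, hfy⟩ := hblockmem n₂ y hy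
      have hbx := hbound x hxS
      have hby := hbound y hyS
      simp only [pvK, hpairF, hfx, hfy]
      omega
  -- A's reverse sort therefore returns exactly R (as (count, letter) pairs)
  have hysperm : (R.map pairF).Perm (S.map pairF) := hpermR.map pairF
  have hyspw : (R.map pairF).Pairwise (fun a b => pvK b < pvK a) := List.pairwise_map.mpr hpwR
  have hsorted : PySem.List.sorted (S.map pairF) pvK true = R.map pairF :=
    PySem.List.sorted_rev_eq_of_perm_of_pairwise_gt _ _ pvK hysperm hyspw
  -- the lexicographic (count, 122 - ord) key agrees with pvK on the letters of the name
  have h2 : PySem.List.sorted2 (S.map pairF) (fun v => v.1)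
      (fun v => (122 : Int) - (v.2.toNat : Int)) true
      = PySem.List.sorted (S.map pairF) pvK true := by
    rw [PySem.List.sorted_rev_eq_foldl_insertBy]
    simp only [PySem.List.sorted2]
    apply pvFoldlInsertByCongr
    · intro a ha b hb
      obtain ⟨ca, hca, rfl⟩ := List.mem_map.mp ha
      obtain ⟨cb, hcb, rfl⟩ := List.mem_map.mp hb
      have h1 := hbound ca hca
      have h2 := hbound cb hcb
      rw [Bool.eq_iff_iff]
      simp only [pvK, hpairF, if_true, Bool.or_eq_true, Bool.and_eq_true,
        Bool.not_eq_true', decide_eq_true_eq, decide_eq_false_iff_not]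
      omega
    · intro a _ b hb
      simp at hb
  rw [h2, hsorted]
  -- take the first four letters
  have hfinal : (PySem.List.slice (R.map pairF) none (some 4)).map (fun v => v.2)
      = PySem.List.slice R none (some 4) := by
    rw [PySem.List.slice_to _ (by norm_num), PySem.List.slice_to _ (by norm_num)]
    rw [← List.map_take, List.map_map]
    simp [Function.comp_def, hpairF]
  rw [hfinal]
-- ===== VERDICT (by name: the statement is the Claim_ definition above) =====
theorem derive_checksum_spec : Claim_equal_derive_checksum := by
  intro name hd
  unfold Spec_derive_checksum
  exact derive_checksum_eq name hd
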